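-- pv_equiv track=rewrite | github.com/LucasIrineu/inventory-report | inventory_report/reports/utils.py | most_products_report
-- ===== SOURCE A (Python) =====
-- from typing import List, Dict
--
-- def most_products_report(companies: List[Dict]):
--     company_with_most_products = companies[0]
--
--     for company in companies:
--         if (
--             company["products_count"]
--             >= company_with_most_products["products_count"]
--         ):
--             company_with_most_products = company
--
--     return company_with_most_products
-- ===== SOURCE B (Python) =====
-- def most_products_report(companies):
--     ordered = sorted(companies, key=lambda c: c["products_count"])
--     return ordered[-1]
-- ===== Notes on version B (the rewrite author's own statement) =====
-- stated objective: simpler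
-- what changed: Replaced the explicit >=-max scan loop with a stable sort by products_count followed by taking the last element (stability makes the last element the last-in-original maximal company, matching A's >= tie rule).
import Mathlib
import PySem

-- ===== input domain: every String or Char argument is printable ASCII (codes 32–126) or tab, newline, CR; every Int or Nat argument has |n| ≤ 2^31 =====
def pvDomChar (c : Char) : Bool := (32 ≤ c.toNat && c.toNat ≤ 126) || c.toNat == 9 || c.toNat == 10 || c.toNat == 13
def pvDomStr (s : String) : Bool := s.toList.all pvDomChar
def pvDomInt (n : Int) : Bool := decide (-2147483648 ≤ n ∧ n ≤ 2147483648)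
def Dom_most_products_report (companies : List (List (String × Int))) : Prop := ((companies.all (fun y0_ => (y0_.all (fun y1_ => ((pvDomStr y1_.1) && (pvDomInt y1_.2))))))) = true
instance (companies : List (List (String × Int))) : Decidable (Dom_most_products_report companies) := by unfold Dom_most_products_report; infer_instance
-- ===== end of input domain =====

-- B replaces A's explicit >=-max scan with a stable sort by products_count and taking the last
-- element (objective: simpler); equal on nonempty inputs whose dicts all carry "products_count".


-- company["products_count"]: first-match lookup in the association list (Pre_ guarantees the key
-- is present, where Python would otherwise raise KeyError; the .getD 0 default is unreachable there)
def pcount (c : List (String × Int)) : Int := (c.lookup "products_count").getD 0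

-- ===== PORT A =====
-- companies[0] raises IndexError on []; Pre_ excludes the empty list (the [] result is unreachable)
def most_products_report (companies : List (List (String × Int))) : List (String × Int) :=
  match companies with
  | [] => []
  | c0 :: _ =>
    companies.foldl (fun best company => if pcount best ≤ pcount company then company else best) c0

-- ===== PORT B =====
-- sorted(companies, key=...) then ordered[-1]; [-1] raises IndexError on [] (excluded by Pre_)
def most_products_report_alt (companies : List (List (String × Int))) : List (String × Int) :=
  let ordered := PySem.List.sorted companies pcount
  (PySem.List.pyGet? ordered (-1)).getD []

-- ===== PRECONDITION & SPEC =====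
-- Pre_: nonempty (both versions raise IndexError on []) and every company dict carries the
-- "products_count" key (otherwise both versions raise KeyError).
def Pre_most_products_report (companies : List (List (String × Int))) : Prop :=
  companies ≠ [] ∧ ∀ c ∈ companies, (c.lookup "products_count").isSome
instance (companies : List (List (String × Int))) : Decidable (Pre_most_products_report companies) := by unfold Pre_most_products_report; infer_instance
def pvWitness_most_products_report : (List (List (String × Int))) :=
  ([[("products_count", 3)], [("products_count", 7), ("name", 1)], [("products_count", 7)]])
def Spec_most_products_report (companies : List (List (String × Int))) (out : List (String × Int)) : Prop := out = most_products_report_alt companies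
instance (companies : List (List (String × Int))) (out : List (String × Int)) : Decidable (Spec_most_products_report companies out) := by unfold Spec_most_products_report; infer_instance

-- ===== CLAIM (what is proved, stated in full; the proofs are below) =====
def Claim_equal_most_products_report : Prop := ∀ (companies : List (List (String × Int))), Dom_most_products_report companies → Pre_most_products_report companies → Spec_most_products_report companies (most_products_report companies)

-- ===== LEMMAS AND PROOFS =====

-- Inserting x into a key-sorted list: the last element becomes x exactly when x's key is ≥ the old
-- last key — the same update A's scan performs.
theorem insertBy_getLast? {α : Type} (key : α → Int) (x : α) :
    ∀ (s : List α) (b : α), s.getLast? = some b →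
      s.Pairwise (fun a c => key a ≤ key c) →
      (PySem.List.insertBy (fun a c => decide (key a < key c)) x s).getLast?
        = some (if key b ≤ key x then x else b) := by
  intro s
  induction s with
  | nil => intro b hb _; simp at hb
  | cons a t ih =>
    intro b hb hp
    cases t with
    | nil =>
      simp at hb; subst hb
      by_cases h : key x < key a
      · rw [if_neg (by omega : ¬ key a ≤ key x)]
        simp [PySem.List.insertBy, h]
      · rw [if_pos (by omega : key a ≤ key x)]
        simp [PySem.List.insertBy, h]
    | cons a2 t2 =>
      have hb' : (a2 :: t2).getLast? = some b := by
        simpa [List.getLast?_cons_cons] using hb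
      have hab : key a ≤ key b := by
        have hmem : b ∈ a2 :: t2 := List.mem_of_getLast? hb'
        exact (List.pairwise_cons.mp hp).1 b hmem
      by_cases h : key x < key a
      · have : PySem.List.insertBy (fun a c => decide (key a < key c)) x (a :: a2 :: t2)
            = x :: a :: a2 :: t2 := by simp [PySem.List.insertBy, h]
        rw [this, if_neg (by omega : ¬ key b ≤ key x)]
        simpa [List.getLast?_cons_cons] using hb
      · have hrec := ih b hb' (List.pairwise_cons.mp hp).2
        have hstep : PySem.List.insertBy (fun a c => decide (key a < key c)) x (a :: a2 :: t2)
            = a :: PySem.List.insertBy (fun a c => decide (key a < key c)) x (a2 :: t2) := by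
          simp [PySem.List.insertBy, h]
        rw [hstep]
        cases hins : PySem.List.insertBy (fun a c => decide (key a < key c)) x (a2 :: t2) with
        | nil => simp [PySem.List.insertBy] at hins; split at hins <;> simp_all
        | cons z zs => rw [List.getLast?_cons_cons]; rw [hins] at hrec; exact hrec

-- The last element of the stable sort of c0 :: rest is exactly A's fold over rest started at c0.
theorem sorted_getLast?_eq_foldl (key : List (String × Int) → Int) :
    ∀ (rest : List (List (String × Int))) (c0 : List (String × Int)),
      (PySem.List.sorted (c0 :: rest) key).getLast?
        = some (rest.foldl (fun best c => if key best ≤ key c then c else best) c0) := by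
  intro rest
  induction rest using List.reverseRecOn with
  | nil =>
    intro c0
    simp [PySem.List.sorted_eq_foldl_insertBy, PySem.List.insertBy]
  | append_singleton rest x ih =>
    intro c0
    have hsplit : (PySem.List.sorted (c0 :: (rest ++ [x])) key).getLast?
        = (PySem.List.insertBy (fun a c => decide (key a < key c)) x
            (PySem.List.sorted (c0 :: rest) key)).getLast? := by
      rw [PySem.List.sorted_eq_foldl_insertBy, PySem.List.sorted_eq_foldl_insertBy,
        show c0 :: (rest ++ [x]) = (c0 :: rest) ++ [x] by simp, List.foldl_append]
      simp
    rw [hsplit,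
      insertBy_getLast? key x _ _ (ih c0) (PySem.List.sorted_pairwise (c0 :: rest) key),
      List.foldl_append]
    simp

-- ===== VERDICT (by name: the statement is the Claim_ definition above) =====
theorem most_products_report_spec : Claim_equal_most_products_report := by
  intro companies _ hpre
  unfold Spec_most_products_report
  cases companies with
  | nil => exact absurd rfl hpre.1
  | cons c0 rest =>
    have hA : most_products_report (c0 :: rest)
        = (c0 :: rest).foldl (fun best c => if pcount best ≤ pcount c then c else best) c0 := rfl
    have hB : most_products_report_alt (c0 :: rest)
        = (PySem.List.pyGet? (PySem.List.sorted (c0 :: rest) pcount) (-1)).getD [] := rfl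
    rw [hA, hB, PySem.List.pyGet?_neg_one, sorted_getLast?_eq_foldl pcount rest c0]
    simp [List.foldl_cons]
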